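-- pv_equiv track=rewrite | github.com/sainihimanshu1999/FB-List | MinumumRemovalofInvalidParenthsis.py | InvalidParanthesis
-- ===== SOURCE A (Python) =====
-- def InvalidParanthesis(s):
--     s = list(s)
--     stack = []
--
--     for i,char in enumerate(s):
--         if char == '(':
--             stack.append(i)
--
--         if char ==')':
--             if stack:
--                 stack.pop()
--             else:
--                 s[i] = ''
--     while stack:
--         s[stack.pop()] = ''
--
--     return ''.join(s)
-- ===== SOURCE B (Python) =====
-- def InvalidParanthesis(s):
--     # Two counter passes instead of an index stack: pass 1 drops unmatched ')',
--     # pass 2 (right-to-left) drops unmatched '('.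
--     out = []
--     opened = 0
--     for ch in s:
--         if ch == '(':
--             opened += 1
--             out.append(ch)
--         elif ch == ')':
--             if opened > 0:
--                 opened -= 1
--                 out.append(ch)
--             else:
--                 out.append('')
--         else:
--             out.append(ch)
--     res = []
--     close = 0
--     for ch in reversed(out):
--         if ch == ')':
--             close += 1
--             res.append(ch)
--         elif ch == '(':
--             if close > 0:
--                 close -= 1
--                 res.append(ch)
--             else:
--                 res.append('')
--         else:
--             res.append(ch)
--     return ''.join(reversed(res))
-- ===== Notes on version B (the rewrite author's own statement) =====
-- stated objective: alternative
-- what changed: Replaces the index stack and in-place indexed blanking with two counter passes: a left-to-right pass with an open counter dropping unmatched closing parens and a right-to-left pass with a close counter dropping unmatched opening parens.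
import Mathlib
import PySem

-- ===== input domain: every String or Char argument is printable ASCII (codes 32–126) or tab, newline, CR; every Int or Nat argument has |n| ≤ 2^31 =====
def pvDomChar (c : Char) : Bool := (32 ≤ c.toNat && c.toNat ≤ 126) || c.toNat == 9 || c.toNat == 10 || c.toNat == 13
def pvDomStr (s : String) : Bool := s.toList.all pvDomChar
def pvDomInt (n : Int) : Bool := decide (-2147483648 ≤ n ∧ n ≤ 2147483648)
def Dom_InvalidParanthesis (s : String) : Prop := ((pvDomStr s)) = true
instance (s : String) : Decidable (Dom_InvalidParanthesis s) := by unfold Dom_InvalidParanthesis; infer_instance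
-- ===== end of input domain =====

-- B replaces A's index stack by two counter passes (drop unmatched closers left-to-right,
-- then unmatched openers right-to-left); an alternative linear algorithm, same return value.


-- ===== PORT A =====
-- a blanked cell (Python s[i] = '') is modelled as `none`; ''.join is filterMap id.
-- state: (current index i from enumerate, the char list, the stack of indices, top first)
def pvAStep (acc : Nat × List (Option Char) × List Nat) (ch : Char) :
    Nat × List (Option Char) × List Nat :=
  let i := acc.1
  let sa := acc.2.1
  let st := acc.2.2
  let st := if ch = '(' then i :: st else st
  let r :=
    if ch = ')' then
      (if st = [] then (sa.set i none, st) else (sa, st.tail))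
    else (sa, st)
  (i + 1, r.1, r.2)

def InvalidParanthesis (s : String) : String :=
  let cs := s.toList
  let p := cs.foldl pvAStep (0, cs.map some, [])
  let sa := p.2.2.foldl (fun sa j => sa.set j none) p.2.1
  String.mk (sa.filterMap id)

-- ===== PORT B =====
-- pass 1: left-to-right, counter of open '(' still matchable; unmatched ')' → none
def pvBStep1 (acc : List (Option Char) × Nat) (ch : Char) : List (Option Char) × Nat :=
  if ch = '(' then (acc.1 ++ [some ch], acc.2 + 1)
  else if ch = ')' then
    (if acc.2 > 0 then (acc.1 ++ [some ch], acc.2 - 1) else (acc.1 ++ [none], acc.2))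
  else (acc.1 ++ [some ch], acc.2)

-- pass 2: right-to-left (fold over the reverse), counter of ')' still matchable;
-- unmatched '(' → none; the result list is built reversed and reversed back at the end
def pvBStep2 (acc : List (Option Char) × Nat) (c : Option Char) : List (Option Char) × Nat :=
  if c = some ')' then (acc.1 ++ [c], acc.2 + 1)
  else if c = some '(' then
    (if acc.2 > 0 then (acc.1 ++ [c], acc.2 - 1) else (acc.1 ++ [none], acc.2))
  else (acc.1 ++ [c], acc.2)

def InvalidParanthesis_alt (s : String) : String :=
  let p1 := s.toList.foldl pvBStep1 ([], 0)
  let p2 := p1.1.reverse.foldl pvBStep2 ([], 0)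
  String.mk (p2.1.reverse.filterMap id)

-- ===== PRECONDITION & SPEC =====
def Spec_InvalidParanthesis (s : String) (out : String) : Prop := out = InvalidParanthesis_alt s
instance (s : String) (out : String) : Decidable (Spec_InvalidParanthesis s out) := by unfold Spec_InvalidParanthesis; infer_instance

-- ===== CLAIM (what is proved, stated in full; the proofs are below) =====
def Claim_equal_InvalidParanthesis : Prop := ∀ (s : String), Dom_InvalidParanthesis s → Spec_InvalidParanthesis s (InvalidParanthesis s)

-- ===== LEMMAS AND PROOFS =====

-- reference result of pass 1 (chars with unmatched ')' blanked), parameterised by the open counter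
def pvP1 : List Char → Nat → List (Option Char)
  | [], _ => []
  | c :: cs, o =>
    if c = '(' then some '(' :: pvP1 cs (o + 1)
    else if c = ')' then
      (if o = 0 then none :: pvP1 cs 0 else some ')' :: pvP1 cs (o - 1))
    else some c :: pvP1 cs o

-- the final open counter of pass 1
def pvCnt : List Char → Nat → Nat
  | [], o => o
  | c :: cs, o =>
    if c = '(' then pvCnt cs (o + 1)
    else if c = ')' then (if o = 0 then pvCnt cs 0 else pvCnt cs (o - 1))
    else pvCnt cs o

-- A's stack, computed on the raw chars
def pvStk2 : List Char → Nat → List Nat → List Nat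
  | [], _, st => st
  | c :: cs, i, st =>
    if c = '(' then pvStk2 cs (i + 1) (i :: st)
    else if c = ')' then (if st = [] then pvStk2 cs (i + 1) [] else pvStk2 cs (i + 1) st.tail)
    else pvStk2 cs (i + 1) st

-- one step of the paren stack on a blanked cell
def pvStepS (c : Option Char) (j : Nat) (st : List Nat) : List Nat :=
  if c = some '(' then j :: st else if c = some ')' then st.tail else st

-- the paren stack computed on the blanked list (pass-1 output)
def pvStkA : List (Option Char) → Nat → List Nat → List Nat
  | [], _, st => st
  | c :: t, i, st => pvStkA t (i + 1) (pvStepS c i st)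

-- depth after scanning a blanked list; none if some ')' finds depth 0
def pvDpt : List (Option Char) → Nat → Option Nat
  | [], d => some d
  | c :: t, d =>
    if c = some '(' then pvDpt t (d + 1)
    else if c = some ')' then (if d = 0 then none else pvDpt t (d - 1))
    else pvDpt t d

-- one right-to-left step of pass 2: (output cell, new close counter)
def pvStepR (c : Option Char) (cl : Nat) : Option Char × Nat :=
  if c = some ')' then (c, cl + 1)
  else if c = some '(' then (if cl > 0 then (c, cl - 1) else (none, cl))
  else (c, cl)

-- pass 2 as a structural right-recursion: input cl is the close counter at the right end
def pvG : List (Option Char) → Nat → List (Option Char) × Nat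
  | [], cl => ([], cl)
  | c :: t, cl =>
    let p := pvG t cl
    let q := pvStepR c p.2
    (q.1 :: p.1, q.2)

-- blanking a set of positions, exactly A's while-loop
def pvBlank (st : List Nat) (t : List (Option Char)) : List (Option Char) :=
  st.foldl (fun t j => t.set j none) t

theorem pvSet_append (l1 l2 : List (Option Char)) (j : Nat) (h : j < l1.length) :
    (l1 ++ l2).set j none = l1.set j none ++ l2 := by
  induction l1 generalizing j with
  | nil => simp at h
  | cons a l ih =>
    cases j with
    | zero => simp
    | succ j => simp only [List.cons_append, List.set_cons_succ]; rw [ih]; simpa using h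


theorem pvBlank_append (st : List Nat) (t : List (Option Char)) (x : Option Char)
    (h : ∀ j ∈ st, j < t.length) :
    pvBlank st (t ++ [x]) = pvBlank st t ++ [x] := by
  induction st generalizing t with
  | nil => rfl
  | cons j st ih =>
    simp only [pvBlank, List.foldl_cons] at *
    rw [pvSet_append _ _ _ (h j (by simp))]
    rw [ih]
    intro k hk
    simpa using h k (by simp [hk])


theorem pvA_loop (cs : List Char) (pre : List (Option Char)) (st : List Nat) :
    cs.foldl pvAStep (pre.length, pre ++ cs.map some, st) =
      (pre.length + cs.length, pre ++ pvP1 cs st.length, pvStk2 cs pre.length st) := by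
  induction cs generalizing pre st with
  | nil => simp [pvP1, pvStk2]
  | cons c cs ih =>
    by_cases h1 : c = '('
    · subst h1
      have := ih (pre ++ [some '(']) ((pre.length) :: st)
      simp only [List.length_append, List.length_cons, List.length_nil, List.append_assoc,
        List.cons_append, List.nil_append] at this ⊢
      simp [pvAStep, pvP1, pvStk2, List.foldl_cons, this]
      omega
    · by_cases h2 : c = ')'
      · subst h2
        by_cases h3 : st = []
        · subst h3
          have := ih (pre ++ [none]) []
          simp only [List.length_append, List.length_cons, List.length_nil,
            List.append_assoc, List.cons_append, List.nil_append] at this ⊢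
          have hset : (pre ++ some ')' :: cs.map some).set pre.length none
              = (pre ++ [none]) ++ cs.map some := by
            have : pre ++ some ')' :: cs.map some = (pre ++ [some ')']) ++ cs.map some := by simp
            rw [this, pvSet_append _ _ _ (by simp)]
            simp
          simp [pvAStep, pvP1, pvStk2, List.foldl_cons, hset, this]
          omega
        · obtain ⟨a, st', rfl⟩ : ∃ a st', st = a :: st' := by
            cases st with | nil => exact absurd rfl h3 | cons a st' => exact ⟨a, st', rfl⟩
          have := ih (pre ++ [some ')']) st'
          simp only [List.length_append, List.length_cons, List.length_nil,
            List.append_assoc, List.cons_append, List.nil_append] at this ⊢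
          simp [pvAStep, pvP1, pvStk2, List.foldl_cons, this]
          omega
      · have := ih (pre ++ [some c]) st
        simp only [List.length_append, List.length_cons, List.length_nil,
          List.append_assoc, List.cons_append, List.nil_append] at this ⊢
        simp [pvAStep, pvP1, pvStk2, List.foldl_cons, h1, h2, this]
        omega


theorem pvB1_loop (cs : List Char) (out : List (Option Char)) (o : Nat) :
    cs.foldl pvBStep1 (out, o) = (out ++ pvP1 cs o, pvCnt cs o) := by
  induction cs generalizing out o with
  | nil => simp [pvP1, pvCnt]
  | cons c cs ih =>
    by_cases h1 : c = '('
    · subst h1; simp [pvBStep1, pvP1, pvCnt, List.foldl_cons, ih]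
    · by_cases h2 : c = ')'
      · subst h2
        by_cases h3 : o = 0
        · subst h3; simp [pvBStep1, pvP1, pvCnt, List.foldl_cons, ih]
        · simp [pvBStep1, pvP1, pvCnt, List.foldl_cons, ih, h3, Nat.pos_of_ne_zero h3]
      · simp [pvBStep1, pvP1, pvCnt, List.foldl_cons, ih, h1, h2]


theorem pvStk_eq (cs : List Char) (i : Nat) (st : List Nat) :
    pvStkA (pvP1 cs st.length) i st = pvStk2 cs i st ∧
      (pvDpt (pvP1 cs st.length) st.length).isSome := by
  induction cs generalizing i st with
  | nil => simp [pvP1, pvStkA, pvStk2, pvDpt]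
  | cons c cs ih =>
    by_cases h1 : c = '('
    · subst h1
      have := ih (i + 1) (i :: st)
      simpa [pvP1, pvStkA, pvStk2, pvDpt, pvStepS] using this
    · by_cases h2 : c = ')'
      · subst h2
        by_cases h3 : st = []
        · subst h3
          have := ih (i + 1) ([] : List Nat)
          simpa [pvP1, pvStkA, pvStk2, pvDpt, pvStepS] using this
        · obtain ⟨a, st', rfl⟩ : ∃ a st', st = a :: st' := by
            cases st with | nil => exact absurd rfl h3 | cons a st' => exact ⟨a, st', rfl⟩
          have := ih (i + 1) st'
          simpa [pvP1, pvStkA, pvStk2, pvDpt, pvStepS, h3] using this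
      · have := ih (i + 1) st
        simpa [pvP1, pvStkA, pvStk2, pvDpt, pvStepS, h1, h2] using this


theorem pvG_snoc (t : List (Option Char)) (c : Option Char) (cl : Nat) :
    pvG (t ++ [c]) cl =
      ((pvG t (pvStepR c cl).2).1 ++ [(pvStepR c cl).1], (pvG t (pvStepR c cl).2).2) := by
  induction t generalizing cl with
  | nil => simp [pvG]
  | cons a t ih => simp [pvG, ih]


theorem pvB2_loop (t : List (Option Char)) (res : List (Option Char)) (cl : Nat) :
    t.reverse.foldl pvBStep2 (res, cl) = (res ++ (pvG t cl).1.reverse, (pvG t cl).2) := by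
  induction t using List.reverseRecOn generalizing res cl with
  | nil => simp [pvG]
  | append_singleton t c ih =>
    rw [List.reverse_append, List.reverse_singleton, List.singleton_append, List.foldl_cons]
    have hstep : pvBStep2 (res, cl) c = (res ++ [(pvStepR c cl).1], (pvStepR c cl).2) := by
      simp only [pvBStep2, pvStepR]
      split_ifs <;> rfl
    rw [hstep, ih, pvG_snoc]
    simp


theorem pvDpt_append (t l : List (Option Char)) (d : Nat) :
    pvDpt (t ++ l) d = (pvDpt t d).bind (pvDpt l) := by
  induction t generalizing d with
  | nil => simp [pvDpt]
  | cons c t ih =>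
    by_cases h1 : c = some '('
    · simp [pvDpt, h1, ih]
    · by_cases h2 : c = some ')'
      · by_cases h3 : d = 0 <;> simp [pvDpt, h2, h3, ih]
      · simp [pvDpt, h1, h2, ih]


theorem pvStkA_snoc (t : List (Option Char)) (c : Option Char) (i : Nat) (st : List Nat) :
    pvStkA (t ++ [c]) i st = pvStepS c (i + t.length) (pvStkA t i st) := by
  induction t generalizing i st with
  | nil => simp [pvStkA]
  | cons a t ih => simp [pvStkA, ih]; ring_nf


theorem pvSet_append_last (l : List (Option Char)) (x : Option Char) :
    (l ++ [x]).set l.length none = l ++ [none] := by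
  induction l with
  | nil => rfl
  | cons a l ih => simp [ih]

theorem pvStk_inv (t : List (Option Char)) (i : Nat) (st : List Nat)
    (hb : ∀ j ∈ st, j < i) (h : (pvDpt t st.length).isSome) :
    pvDpt t st.length = some (pvStkA t i st).length ∧
      ∀ j ∈ pvStkA t i st, j < i + t.length := by
  induction t generalizing i st with
  | nil =>
    refine ⟨rfl, fun j hj => ?_⟩
    have := hb j hj
    simp only [List.length_nil]
    omega
  | cons c t ih =>
    by_cases h1 : c = some '('
    · subst h1
      have hrec := ih (i + 1) (i :: st)
        (by intro j hj
            rcases List.mem_cons.mp hj with rfl | hj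
            · omega
            · exact Nat.lt_succ_of_lt (hb j hj))
        (by simpa [pvDpt] using h)
      constructor
      · simpa [pvDpt, pvStkA, pvStepS] using hrec.1
      · intro j hj
        have := hrec.2 j (by simpa [pvStkA, pvStepS] using hj)
        simpa [pvStkA, pvStepS] using by omega
    · by_cases h2 : c = some ')'
      · subst h2
        have hne : st.length ≠ 0 := by
          intro h0; simp [pvDpt, h0] at h
        have hrec := ih (i + 1) st.tail
          (by intro j hj
              exact Nat.lt_succ_of_lt (hb j (List.mem_of_mem_tail hj)))
          (by have : st.tail.length = st.length - 1 := by simp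
              rw [this]; simpa [pvDpt, hne] using h)
        have hlen : st.tail.length = st.length - 1 := by simp
        constructor
        · rw [← hlen] at *
          simpa [pvDpt, pvStkA, pvStepS, hne] using hrec.1
        · intro j hj
          have := hrec.2 j (by simpa [pvStkA, pvStepS] using hj)
          simpa [pvStkA, pvStepS] using by omega
      · have hrec := ih (i + 1) st
          (by intro j hj; exact Nat.lt_succ_of_lt (hb j hj))
          (by simpa [pvDpt, h1, h2] using h)
        constructor
        · simpa [pvDpt, pvStkA, pvStepS, h1, h2] using hrec.1
        · intro j hj
          have := hrec.2 j (by simpa [pvStkA, pvStepS, h1, h2] using hj)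
          simpa [pvStkA, pvStepS, h1, h2] using by omega


theorem pvCore (t : List (Option Char)) (h : (pvDpt t 0).isSome) (cl : Nat) :
    (pvG t cl).1 = pvBlank ((pvStkA t 0 []).drop cl) t ∧
      (pvG t cl).2 = cl - (pvStkA t 0 []).length := by
  induction t using List.reverseRecOn generalizing cl with
  | nil => simp [pvG, pvStkA, pvBlank]
  | append_singleton t c ih =>
    have hT : (pvDpt t 0).isSome := by
      rw [pvDpt_append] at h
      cases hd : pvDpt t 0 with
      | none => rw [hd] at h; simp at h
      | some d => simp
    have hinv := pvStk_inv t 0 [] (by simp) (by simpa using hT)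
    have hdpt : pvDpt t 0 = some (pvStkA t 0 []).length := by simpa using hinv.1
    have hbnd : ∀ j ∈ pvStkA t 0 [], j < t.length := by
      intro j hj; simpa using hinv.2 j hj
    have hbnd' : ∀ (n : Nat), ∀ j ∈ (pvStkA t 0 []).drop n, j < t.length := by
      intro n j hj; exact hbnd j (List.mem_of_mem_drop hj)
    rw [pvG_snoc, pvStkA_snoc]
    simp only [Nat.zero_add]
    by_cases h2 : c = some ')'
    · subst h2
      have hne : (pvStkA t 0 []).length ≠ 0 := by
        intro h0
        rw [pvDpt_append, hdpt, h0] at h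
        simp [pvDpt] at h
      have e1 : pvStepR (some ')') cl = (some ')', cl + 1) := by simp [pvStepR]
      have e2 : pvStepS (some ')') t.length (pvStkA t 0 []) = (pvStkA t 0 []).tail := by
        simp [pvStepS]
      have hdr : (pvStkA t 0 []).tail.drop cl = (pvStkA t 0 []).drop (cl + 1) := by
        rw [← List.drop_one, List.drop_drop, Nat.add_comm]
      have hih := ih hT (cl + 1)
      rw [e1, e2]
      constructor
      · rw [hdr, pvBlank_append _ _ _ (hbnd' (cl + 1))]
        simp [hih.1]
      · simp only [List.length_tail]
        rw [hih.2]; omega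
    · by_cases h1 : c = some '('
      · subst h1
        have e2 : pvStepS (some '(') t.length (pvStkA t 0 [])
            = t.length :: pvStkA t 0 [] := by simp [pvStepS]
        rw [e2]
        cases cl with
        | zero =>
          have e1 : pvStepR (some '(') 0 = (none, 0) := by simp [pvStepR]
          have hih := ih hT 0
          rw [e1]
          constructor
          · simp only [List.drop_zero]
            rw [show pvBlank (t.length :: pvStkA t 0 []) (t ++ [some '('])
                  = pvBlank (pvStkA t 0 []) ((t ++ [some '(']).set t.length none) from rfl]
            rw [pvSet_append_last, pvBlank_append _ _ _ hbnd]
            simpa using hih.1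
          · simp [hih.2]
        | succ k =>
          have e1 : pvStepR (some '(') (k + 1) = (some '(', k) := by simp [pvStepR]
          have hih := ih hT k
          rw [e1]
          constructor
          · rw [List.drop_succ_cons, pvBlank_append _ _ _ (hbnd' k)]
            simp [hih.1]
          · simp only [List.length_cons]
            rw [hih.2]; omega
      · have e1 : pvStepR c cl = (c, cl) := by simp [pvStepR, h1, h2]
        have e2 : pvStepS c t.length (pvStkA t 0 []) = pvStkA t 0 [] := by
          simp [pvStepS, h1, h2]
        have hih := ih hT cl
        rw [e1, e2]
        constructor
        · rw [pvBlank_append _ _ _ (hbnd' cl)]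
          simp [hih.1]
        · exact hih.2

-- ===== VERDICT (by name: the statement is the Claim_ definition above) =====
theorem InvalidParanthesis_spec : Claim_equal_InvalidParanthesis := by
  intro s _
  unfold Spec_InvalidParanthesis InvalidParanthesis InvalidParanthesis_alt
  have hA := pvA_loop s.toList [] []
  simp only [List.length_nil, List.nil_append, Nat.zero_add] at hA
  have hB1 := pvB1_loop s.toList [] 0
  simp only [List.nil_append] at hB1
  have hstk := pvStk_eq s.toList 0 []
  simp only [List.length_nil] at hstk
  have hB2 := pvB2_loop (pvP1 s.toList 0) [] 0
  have hcore := pvCore (pvP1 s.toList 0) hstk.2 0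
  simp only [List.drop_zero, hstk.1] at hcore
  simp only [hA, hB1, hB2]
  simp only [List.nil_append, List.reverse_reverse]
  rw [hcore.1]
  rfl
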